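-- pv_equiv track=rewrite | github.com/minhduc5a15/utc_code | Python/virut.py | solve
-- ===== SOURCE A (Python) =====
-- def solve(n):
--     count = 0
--     res = 0
--     while n > 3:
--         res += n % 3
--         n -= n % 3
--         while n % 3 == 0:
--             n //= 3
--             count += 1
--     return res + n
-- ===== SOURCE B (Python) =====
-- def solve(n):
--     # For n > 3, A computes the base-3 digit sum s_3(n). By Legendre's identity
--     # s_3(n) = n - 2 * sum_{k>=1} floor(n / 3**k), so instead of extracting
--     # digits we sum floor-quotients by the powers of 3 (no modulo at all).
--     if n <= 3:
--         return n
--     total = 0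
--     p = 3
--     while p <= n:
--         total += n // p
--         p *= 3
--     return n - 2 * total
-- ===== Notes on version B (the rewrite author's own statement) =====
-- stated objective: alternative
-- what changed: For n > 3 A's nested reduction computes the base-3 digit sum; B computes that value by Legendre's identity s_3(n) = n - 2*sum_{k>=1} floor(n/3^k), summing floor-quotients over growing powers of 3 with no modulo or digit extraction.
import Mathlib
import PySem

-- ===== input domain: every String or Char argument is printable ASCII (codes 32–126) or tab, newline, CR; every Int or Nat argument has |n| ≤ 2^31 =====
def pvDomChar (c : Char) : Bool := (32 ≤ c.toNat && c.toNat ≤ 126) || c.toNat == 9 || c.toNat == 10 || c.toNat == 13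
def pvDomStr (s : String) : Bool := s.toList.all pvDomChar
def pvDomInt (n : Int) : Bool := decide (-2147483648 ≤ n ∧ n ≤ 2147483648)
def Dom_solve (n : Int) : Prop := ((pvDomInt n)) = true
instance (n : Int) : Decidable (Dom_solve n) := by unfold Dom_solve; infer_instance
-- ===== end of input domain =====

-- B replaces A's nested digit-extraction reduction by Legendre's identity
-- s_3(n) = n - 2*Σ_{k≥1} ⌊n/3^k⌋, summing floor-quotients over powers of 3; objective: alternative.

-- ===== PORT A =====
-- inner 'while n % 3 == 0: n //= 3' of A; fuel only makes the recursion total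
-- (the loop runs at most log₃ m times, and each call supplies fuel ≥ m.toNat);
-- the unused write-only 'count' counter is dropped (it never affects the result)
def strip3 (fuel : Nat) (m : Int) : Int :=
  match fuel with
  | 0 => m
  | f + 1 => if PySem.Int.mod m 3 = 0 then strip3 f (PySem.Int.floordiv m 3) else m

-- outer 'while n > 3' loop of A; fuel ≥ n.toNat makes the recursion total
def solveLoop (fuel : Nat) (n res : Int) : Int :=
  match fuel with
  | 0 => res + n
  | f + 1 =>
    if 3 < n then
      solveLoop f (strip3 (n - PySem.Int.mod n 3).toNat (n - PySem.Int.mod n 3))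
        (res + PySem.Int.mod n 3)
    else res + n

def solve (n : Int) : Int := solveLoop (n.toNat + 1) n 0

-- ===== PORT B =====
-- 'while p <= n: total += n // p; p *= 3'; fuel ≥ n.toNat makes the recursion total
def powLoop (fuel : Nat) (p n total : Int) : Int :=
  match fuel with
  | 0 => total
  | f + 1 =>
    if p ≤ n then powLoop f (3 * p) n (total + PySem.Int.floordiv n p) else total

def solve_alt (n : Int) : Int :=
  if n ≤ 3 then n else n - 2 * powLoop (n.toNat + 1) 3 n 0

-- ===== PRECONDITION & SPEC =====
def Spec_solve (n : Int) (out : Int) : Prop := out = solve_alt n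
instance (n : Int) (out : Int) : Decidable (Spec_solve n out) := by unfold Spec_solve; infer_instance

-- ===== CLAIM (what is proved, stated in full; the proofs are below) =====
def Claim_equal_solve : Prop := ∀ (n : Int), Dom_solve n → Spec_solve n (solve n)

-- ===== LEMMAS AND PROOFS =====

-- proof-only helper: the base-3 digit-sum loop, the common value of both programs
def digitLoop (fuel : Nat) (n res : Int) : Int :=
  match fuel with
  | 0 => res
  | f + 1 =>
    if 0 < n then digitLoop f (PySem.Int.floordiv n 3) (res + PySem.Int.mod n 3) else res

-- with fuel ≥ m.toNat the stripping loop reaches its fixed point: result positive, ≤ m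
theorem strip3_pos_le (f : Nat) (m : Int) (hm : 0 < m) (hf : m.toNat ≤ f) :
    0 < strip3 f m ∧ strip3 f m ≤ m := by
  induction f generalizing m with
  | zero => exact ⟨by omega, le_refl m⟩
  | succ f ih =>
    rw [strip3]
    split
    · rename_i h
      have hmod := PySem.Int.mod_eq_emod_of_pos (a := m) (b := 3) (by norm_num)
      rw [PySem.Int.floordiv_eq_ediv_of_pos (by norm_num)]
      have hq : 0 < m / 3 := by omega
      have := ih (m / 3) hq (by omega)
      exact ⟨this.1, by omega⟩
    · exact ⟨hm, le_refl m⟩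

-- with enough fuel the stripped value is no longer a multiple of 3
theorem strip3_not_dvd (f : Nat) (m : Int) (hm : 0 < m) (hf : m.toNat ≤ f) :
    PySem.Int.mod (strip3 f m) 3 ≠ 0 := by
  induction f generalizing m with
  | zero =>
    have hmod := PySem.Int.mod_eq_emod_of_pos (a := m) (b := 3) (by norm_num)
    simp only [strip3]
    omega
  | succ f ih =>
    rw [strip3]
    split
    · rename_i h
      have hmod := PySem.Int.mod_eq_emod_of_pos (a := m) (b := 3) (by norm_num)
      rw [PySem.Int.floordiv_eq_ediv_of_pos (by norm_num)]
      exact ih (m / 3) (by omega) (by omega)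
    · rename_i h; exact h

-- digitLoop's result only depends on the fuel through 'fuel ≥ n.toNat'
theorem digitLoop_congr (f g : Nat) (n res : Int) (hf : n.toNat ≤ f) (hg : n.toNat ≤ g) :
    digitLoop f n res = digitLoop g n res := by
  induction f generalizing g n res with
  | zero =>
    have hn : ¬ 0 < n := by omega
    cases g with
    | zero => rfl
    | succ g => rw [digitLoop, digitLoop, if_neg hn]
  | succ f ih =>
    cases g with
    | zero =>
      have hn : ¬ 0 < n := by omega
      rw [digitLoop, digitLoop, if_neg hn]
    | succ g =>
      rw [digitLoop, digitLoop]
      split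
      · rename_i h
        have hmod := PySem.Int.mod_eq_emod_of_pos (a := n) (b := 3) (by norm_num)
        rw [PySem.Int.floordiv_eq_ediv_of_pos (by norm_num)]
        exact ih g (n / 3) _ (by omega) (by omega)
      · rfl

-- digitLoop is blind to leading factors of 3 (they contribute digit 0)
theorem digitLoop_strip3 (f g : Nat) (m res : Int) (hm : 0 < m)
    (hf : m.toNat ≤ f) (hg : m.toNat ≤ g) :
    digitLoop g (strip3 f m) res = digitLoop g m res := by
  induction f generalizing g m res with
  | zero => rfl
  | succ f ih =>
    rw [strip3]
    split
    · rename_i h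
      have hmod := PySem.Int.mod_eq_emod_of_pos (a := m) (b := 3) (by norm_num)
      have hq3 : PySem.Int.floordiv m 3 = m / 3 :=
        PySem.Int.floordiv_eq_ediv_of_pos (by norm_num)
      rw [hq3]
      have hq : 0 < m / 3 := by omega
      have hs := strip3_pos_le f (m / 3) hq (by omega)
      rw [digitLoop_congr g ((m/3).toNat) _ res (by omega) (by omega)]
      rw [ih ((m/3).toNat) (m / 3) res hq (by omega) (le_refl _)]
      cases g with
      | zero => omega
      | succ g =>
        conv_rhs => rw [digitLoop]
        rw [if_pos hm, h, add_zero, hq3]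
        exact digitLoop_congr _ g _ _ (le_refl _) (by omega)
    · rfl

-- the stripped reduct of a state n > 3 is strictly smaller than n
theorem strip3_lt_of_gt3 (n : Int) (h : 3 < n) :
    strip3 (n - PySem.Int.mod n 3).toNat (n - PySem.Int.mod n 3) < n := by
  have hmod := PySem.Int.mod_eq_emod_of_pos (a := n) (b := 3) (by norm_num)
  have hm : 0 < n - PySem.Int.mod n 3 := by omega
  have hle := strip3_pos_le _ _ hm (le_refl _)
  by_cases hr : PySem.Int.mod n 3 = 0
  · rw [hr, sub_zero] at hle ⊢
    have hn3 : n.toNat = (n.toNat - 1) + 1 := by omega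
    rw [hn3, strip3, if_pos hr, PySem.Int.floordiv_eq_ediv_of_pos (by norm_num)]
    have := strip3_pos_le (n.toNat - 1) (n / 3) (by omega) (by omega)
    omega
  · omega

-- A's outer loop computes the base-3 digit sum (digitLoop)
theorem solveLoop_eq (k : Nat) (n res : Int) (f g : Nat) (h0 : 0 < n) (h3 : n ≠ 3)
    (hk : n.toNat ≤ k) (hf : n.toNat ≤ f) (hg : n.toNat ≤ g) :
    solveLoop f n res = digitLoop g n res := by
  induction k generalizing n res f g with
  | zero => omega
  | succ k ih =>
    by_cases h : 3 < n
    · have hf4 : f = (f - 1) + 1 := by omega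
      rw [hf4, solveLoop, if_pos h]
      have hmod := PySem.Int.mod_eq_emod_of_pos (a := n) (b := 3) (by norm_num)
      have hm : 0 < n - PySem.Int.mod n 3 := by omega
      have hsl := strip3_lt_of_gt3 n h
      have hsp := strip3_pos_le ((n - PySem.Int.mod n 3).toNat) _ hm (le_refl _)
      have hnd := strip3_not_dvd ((n - PySem.Int.mod n 3).toNat) _ hm (le_refl _)
      have hsmod := PySem.Int.mod_eq_emod_of_pos
        (a := strip3 (n - PySem.Int.mod n 3).toNat (n - PySem.Int.mod n 3)) (b := 3) (by norm_num)
      rw [ih _ _ (f - 1) g hsp.1 (by omega) (by omega) (by omega) (by omega)]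
      rw [digitLoop_strip3 _ g _ _ hm (le_refl _) (by omega)]
      have hg4 : g = (g - 1) + 1 := by omega
      rw [hg4, digitLoop, digitLoop, if_pos hm, if_pos (by omega : (0:Int) < n)]
      have hmodsub := PySem.Int.mod_eq_emod_of_pos (a := n - PySem.Int.mod n 3) (b := 3) (by norm_num)
      have e2 : PySem.Int.mod (n - PySem.Int.mod n 3) 3 = 0 := by omega
      have e1 : PySem.Int.floordiv (n - PySem.Int.mod n 3) 3 = PySem.Int.floordiv n 3 := by
        rw [PySem.Int.floordiv_eq_ediv_of_pos (by norm_num),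
            PySem.Int.floordiv_eq_ediv_of_pos (by norm_num)]
        omega
      rw [e1, e2, add_zero]
    · have hn12 : n = 1 ∨ n = 2 := by omega
      have hfe : solveLoop f n res = res + n := by
        cases f with
        | zero => rfl
        | succ f => rw [solveLoop, if_neg h]
      rw [hfe]
      rcases hn12 with rfl | rfl
      · have hg1 : g = (g - 1) + 1 := by omega
        rw [hg1, digitLoop, if_pos (by norm_num : (0:Int) < 1),
            show PySem.Int.floordiv 1 3 = 0 from by decide,
            show PySem.Int.mod 1 3 = 1 from by decide]
        cases (g - 1) with
        | zero => rfl
        | succ g' => rw [digitLoop]; norm_num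
      · have hg1 : g = (g - 1) + 1 := by omega
        rw [hg1, digitLoop, if_pos (by norm_num : (0:Int) < 2),
            show PySem.Int.floordiv 2 3 = 0 from by decide,
            show PySem.Int.mod 2 3 = 2 from by decide]
        cases (g - 1) with
        | zero => rfl
        | succ g' => rw [digitLoop]; norm_num

-- the accumulator of powLoop is additive
theorem powLoop_acc (f : Nat) (p n acc : Int) :
    powLoop f p n acc = acc + powLoop f p n 0 := by
  induction f generalizing p acc with
  | zero => simp [powLoop]
  | succ f ih =>
    rw [powLoop, powLoop]
    split
    · rw [ih (3*p) (acc + _), ih (3*p) (0 + _)]; ring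
    · simp

-- stepping the power is the same as dividing n: Σ_k ⌊n/(3p·3^k)⌋ = Σ_k ⌊(n/3)/(p·3^k)⌋
theorem powLoop_shift (f : Nat) (p n acc : Int) (hp : 0 < p) :
    powLoop f (3 * p) n acc = powLoop f p (n / 3) acc := by
  induction f generalizing p acc with
  | zero => rfl
  | succ f ih =>
    rw [powLoop, powLoop]
    have hguard : (3 * p ≤ n) ↔ (p ≤ n / 3) := by
      rw [Int.le_ediv_iff_mul_le (by norm_num : (0:Int) < 3)]
      constructor <;> intro h <;> omega
    by_cases h : 3 * p ≤ n
    · rw [if_pos h, if_pos (hguard.mp h)]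
      have hq : PySem.Int.floordiv n (3 * p) = PySem.Int.floordiv (n / 3) p := by
        rw [PySem.Int.floordiv_eq_ediv_of_pos (by omega),
            PySem.Int.floordiv_eq_ediv_of_pos (by omega)]
        rw [← Int.ediv_ediv_eq_ediv_mul]
        norm_num
      rw [hq, show 3 * (3 * p) = 3 * (3 * p) from rfl]
      exact ih (3 * p) _ (by omega)
    · rw [if_neg h, if_neg (fun hc => h (hguard.mpr hc))]

-- Legendre's identity, loop form: the digit sum equals n - 2·Σ_{k≥1} ⌊n/3^k⌋
theorem digitLoop_powLoop (k : Nat) (n res : Int) (f g : Nat) (h0 : 0 < n)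
    (hk : n.toNat ≤ k) (hf : n.toNat ≤ f) (hg : n.toNat ≤ g) :
    digitLoop g n res = res + n - 2 * powLoop f 3 n 0 := by
  induction k generalizing n res f g with
  | zero => omega
  | succ k ih =>
    have hmod := PySem.Int.mod_eq_emod_of_pos (a := n) (b := 3) (by norm_num)
    have hq3 : PySem.Int.floordiv n 3 = n / 3 :=
      PySem.Int.floordiv_eq_ediv_of_pos (by norm_num)
    have hg1 : g = (g - 1) + 1 := by omega
    have hf1 : f = (f - 1) + 1 := by omega
    by_cases h : 3 ≤ n
    · have hq : 0 < n / 3 := by omega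
      rw [hg1, digitLoop, if_pos h0, hq3]
      rw [ih (n / 3) _ (f - 1) (g - 1) hq (by omega) (by omega) (by omega)]
      rw [hf1, powLoop, if_pos h, hq3, zero_add,
          powLoop_acc (f - 1) (3 * 3) n (n / 3),
          powLoop_shift (f - 1) 3 n 0 (by norm_num)]
      simp only [Nat.add_sub_cancel]
      omega
    · -- n = 1 or 2: one digit, and the quotient sum is empty
      rw [hg1, digitLoop, if_pos h0, hq3,
          show n / 3 = 0 from by omega]
      have : digitLoop (g - 1) 0 (res + PySem.Int.mod n 3) = res + PySem.Int.mod n 3 := by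
        cases (g - 1) with
        | zero => rfl
        | succ g' => rw [digitLoop, if_neg (by omega)]
      rw [this, hf1, powLoop, if_neg (by omega)]
      omega

-- ===== VERDICT (by name: the statement is the Claim_ definition above) =====
theorem solve_spec : Claim_equal_solve := by
  intro n _
  unfold Spec_solve solve solve_alt
  by_cases h : n ≤ 3
  · rw [if_pos h, solveLoop, if_neg (by omega), zero_add]
  · rw [if_neg h,
        solveLoop_eq (n.toNat) n 0 (n.toNat + 1) (n.toNat + 1)
          (by omega) (by omega) (le_refl _) (by omega) (by omega),
        digitLoop_powLoop (n.toNat) n 0 (n.toNat + 1) (n.toNat + 1)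
          (by omega) (le_refl _) (by omega) (by omega)]
    omega
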